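-- pv_equiv track=rewrite | github.com/redasm/Gazer | src/runtime/config_manager.py | is_sensitive_config_path
-- ===== SOURCE A (Python) =====
-- from typing import Any, Dict, List, Optional
--
-- _SENSITIVE_KEY_PATTERNS: List[str] = [
--     "telegram.token",              # Telegram bot token
--     "discord.token",               # Discord bot token
--     "hooks.token",                  # Webhook auth token
--     "email.password",               # Email password
--     "feishu.app_secret",            # Feishu app secret
--     "**.api_key",                   # Generic API keys in nested config
--     "**.token",                     # Generic tokens
--     "**.secret",                    # Generic secrets
--     "**.password",                  # Generic passwords
--     "**.credentials",               # Credentials objects/fields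
--     "web.search.brave_api_key",     # Brave uses a prefixed key name
--     # Keep object shape for trusted_keys; mask direct leaf entries only.
--     "plugins.signature.trusted_keys.*",
-- ]
--
-- def _normalize_path(path: str) -> List[str]:
--     """Normalize a dot path into lowercase segments."""
--     if not path:
--         return []
--     return [part.strip().lower() for part in str(path).strip().split(".") if part.strip()]
--
-- def _match_pattern_parts(pattern_parts: List[str], path_parts: List[str]) -> bool:
--     """Match wildcard path pattern parts against path parts."""
--     pi = 0
--     ti = 0
--     while pi < len(pattern_parts):
--         pp = pattern_parts[pi]
--         if pp == "**":
--             # `**` at the end consumes all remaining segments.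
--             if pi == len(pattern_parts) - 1:
--                 return True
--             # Try to align the remainder of the pattern at each suffix.
--             next_parts = pattern_parts[pi + 1 :]
--             for next_ti in range(ti, len(path_parts) + 1):
--                 if _match_pattern_parts(next_parts, path_parts[next_ti:]):
--                     return True
--             return False
--
--         if ti >= len(path_parts):
--             return False
--         if pp != "*" and pp != path_parts[ti]:
--             return False
--         pi += 1
--         ti += 1
--     return ti == len(path_parts)
--
-- def _match_pattern(pattern: str, path: str) -> bool:
--     """Match a dot-separated pattern with wildcards against a path."""
--     pattern_parts = _normalize_path(pattern)
--     path_parts = _normalize_path(path)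
--     if not pattern_parts:
--         return False
--     return _match_pattern_parts(pattern_parts, path_parts)
--
-- def is_sensitive_config_path(path: str) -> bool:
--     """Return True when *path* points to a sensitive config field."""
--     normalized = ".".join(_normalize_path(path))
--     if not normalized:
--         return False
--     for pattern in _SENSITIVE_KEY_PATTERNS:
--         if _match_pattern(pattern, normalized):
--             return True
--     return False
-- ===== SOURCE B (Python) =====
-- from typing import List
--
-- _SUFFIXES = frozenset({"api_key", "token", "secret", "password", "credentials"})
-- _EXACT = frozenset({
--     ("telegram", "token"),
--     ("discord", "token"),
--     ("hooks", "token"),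
--     ("email", "password"),
--     ("feishu", "app_secret"),
--     ("web", "search", "brave_api_key"),
-- })
--
-- def _normalize_path(path: str) -> List[str]:
--     """Normalize a dot path into lowercase segments."""
--     if not path:
--         return []
--     return [part.strip().lower() for part in str(path).strip().split(".") if part.strip()]
--
-- def is_sensitive_config_path(path: str) -> bool:
--     parts = _normalize_path(path)
--     if not parts:
--         return False
--     return (parts[-1] in _SUFFIXES
--             or tuple(parts) in _EXACT
--             or (len(parts) == 4 and parts[:3] == ["plugins", "signature", "trusted_keys"]))
-- ===== Notes on version B (the rewrite author's own statement) =====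
-- stated objective: simpler
-- what changed: A runs a recursive backtracking wildcard matcher over 12 dot-patterns for every query; B normalizes the path once and decides sensitivity with three direct checks (last segment in a literal suffix set, whole segment tuple in a literal exact set, or the 4-segment plugins.signature.trusted_keys shape).
import Mathlib
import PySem

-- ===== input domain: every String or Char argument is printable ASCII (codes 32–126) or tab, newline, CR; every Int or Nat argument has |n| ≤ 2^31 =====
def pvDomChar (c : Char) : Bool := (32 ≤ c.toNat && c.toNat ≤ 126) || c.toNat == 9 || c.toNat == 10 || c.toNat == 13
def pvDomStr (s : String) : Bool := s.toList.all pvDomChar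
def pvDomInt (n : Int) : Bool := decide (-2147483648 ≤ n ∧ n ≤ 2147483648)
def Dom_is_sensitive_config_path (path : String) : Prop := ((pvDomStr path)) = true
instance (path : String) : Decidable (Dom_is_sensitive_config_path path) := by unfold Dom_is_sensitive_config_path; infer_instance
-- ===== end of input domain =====

-- B replaces A's recursive wildcard pattern matcher (run for each of 12 patterns) by three direct
-- checks on the normalized segments: last segment in a suffix set, whole path in an exact set,
-- or the trusted_keys 4-segment shape (objective: simpler).

-- ===== PORT A =====
def pvSensitivePatterns : List String :=
  ["telegram.token", "discord.token", "hooks.token", "email.password",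
   "feishu.app_secret", "**.api_key", "**.token", "**.secret", "**.password",
   "**.credentials", "web.search.brave_api_key", "plugins.signature.trusted_keys.*"]

-- _normalize_path: strip, split on '.', keep non-empty stripped parts, lowercase them
def pvNormalizeA (cs : List Char) : List (List Char) :=
  if cs = [] then []
  else
    ((PySem.Chars.splitOn (PySem.Chars.strip cs) ['.']).filter
        (fun p => PySem.Chars.strip p ≠ [])).map
      (fun p => PySem.Chars.lower (PySem.Chars.strip p))

-- _match_pattern_parts: the while loop over (pi, ti) as recursion on the two suffixes
def pvMatchParts : List (List Char) → List (List Char) → Bool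
  | [], pathParts => pathParts.isEmpty
  | pp :: rest, pathParts =>
    if pp = ['*','*'] then
      if rest = [] then true
      else (List.range (pathParts.length + 1)).any (fun i => pvMatchParts rest (pathParts.drop i))
    else
      match pathParts with
      | [] => false
      | t :: ts => if pp ≠ ['*'] ∧ pp ≠ t then false else pvMatchParts rest ts

def pvMatchPattern (pattern path : List Char) : Bool :=
  let patternParts := pvNormalizeA pattern
  let pathParts := pvNormalizeA path
  if patternParts = [] then false else pvMatchParts patternParts pathParts

def is_sensitive_config_path (path : String) : Bool :=
  let normalized := PySem.Chars.join ['.'] (pvNormalizeA path.toList)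
  if normalized = [] then false
  else pvSensitivePatterns.any (fun pat => pvMatchPattern pat.toList normalized)

-- ===== PORT B =====
def pvSuffixes : List (List Char) :=
  ["api_key".toList, "token".toList, "secret".toList, "password".toList, "credentials".toList]

def pvExact : List (List (List Char)) :=
  [["telegram".toList, "token".toList],
   ["discord".toList, "token".toList],
   ["hooks".toList, "token".toList],
   ["email".toList, "password".toList],
   ["feishu".toList, "app_secret".toList],
   ["web".toList, "search".toList, "brave_api_key".toList]]

-- B's _normalize_path (same code as A's helper, kept unchanged in Source B)
def pvNormalizeB (cs : List Char) : List (List Char) :=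
  if cs = [] then []
  else
    ((PySem.Chars.splitOn (PySem.Chars.strip cs) ['.']).filter
        (fun p => PySem.Chars.strip p ≠ [])).map
      (fun p => PySem.Chars.lower (PySem.Chars.strip p))

def is_sensitive_config_path_alt (path : String) : Bool :=
  match pvNormalizeB path.toList with
  | [] => false
  | p :: ps =>
    pvSuffixes.contains ((p :: ps).getLast (by simp))
    || pvExact.contains (p :: ps)
    || ((p :: ps).length == 4 &&
        (p :: ps).take 3 == ["plugins".toList, "signature".toList, "trusted_keys".toList])

-- ===== PRECONDITION & SPEC =====
def Spec_is_sensitive_config_path (path : String) (out : Bool) : Prop := out = is_sensitive_config_path_alt path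
instance (path : String) (out : Bool) : Decidable (Spec_is_sensitive_config_path path out) := by unfold Spec_is_sensitive_config_path; infer_instance

-- ===== CLAIM (what is proved, stated in full; the proofs are below) =====
def Claim_equal_is_sensitive_config_path : Prop := ∀ (path : String), Dom_is_sensitive_config_path path → Spec_is_sensitive_config_path path (is_sensitive_config_path path)

-- ===== LEMMAS AND PROOFS =====

def pvSplitAux (cur : List Char) : List Char → List (List Char)
  | [] => [cur.reverse]
  | c :: r => if c = '.' then cur.reverse :: pvSplitAux [] r else pvSplitAux (c :: cur) r

lemma pvGo_spec : ∀ (l : List Char) (fuel : Nat) (cur : List Char) (acc : List (List Char)),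
    l.length < fuel →
    PySem.Chars.splitOn.go ['.'] fuel l cur acc = acc.reverse ++ pvSplitAux cur l := by
  intro l
  induction l with
  | nil =>
    intro fuel cur acc h
    match fuel, h with
    | fuel + 1, _ => simp [PySem.Chars.splitOn.go, pvSplitAux]
  | cons c r ih =>
    intro fuel cur acc h
    match fuel, h with
    | fuel + 1, h =>
      simp only [PySem.Chars.splitOn.go, pvSplitAux]
      have hr : r.length < fuel := by simpa using Nat.lt_of_succ_lt_succ h
      by_cases hc : c = '.'
      · subst hc
        simp [List.isPrefixOf, ih fuel [] ((cur.reverse) :: acc) hr]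
      · have hp : (['.'].isPrefixOf (c :: r)) = false := by
          simp [List.isPrefixOf]; exact fun h' => (hc h'.symm).elim
        simp [hp, hc, ih fuel (c :: cur) acc hr]

lemma pvSplitOn_eq (l : List Char) : PySem.Chars.splitOn l ['.'] = pvSplitAux [] l := by
  simpa using pvGo_spec l (l.length + 1) [] [] (by omega)

lemma pvSplitAux_append (p : List Char) : ∀ (cur t : List Char), '.' ∉ p →
    pvSplitAux cur (p ++ t) = pvSplitAux (p.reverse ++ cur) t := by
  induction p with
  | nil => simp
  | cons c q ih =>
    intro cur t hp
    have hc : c ≠ '.' := fun h => hp (h ▸ List.mem_cons_self)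
    simp [pvSplitAux, hc, ih (c :: cur) t (fun h => hp (List.mem_cons_of_mem _ h))]

lemma pvIntercalate_cons₂ (s a b : List Char) (t : List (List Char)) :
    List.intercalate s (a :: b :: t) = a ++ s ++ List.intercalate s (b :: t) := by
  simp [List.intercalate, List.intersperse]

lemma pvSplit_roundtrip : ∀ (parts : List (List Char)) (p : List Char), '.' ∉ p →
    (∀ q ∈ parts, '.' ∉ q) →
    pvSplitAux [] (List.intercalate ['.'] (p :: parts)) = p :: parts := by
  intro parts
  induction parts with
  | nil =>
    intro p hp _
    have h := pvSplitAux_append p [] [] hp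
    simp only [List.append_nil] at h
    simp [List.intercalate, List.intersperse, h, pvSplitAux]
  | cons q t ih =>
    intro p hp hq
    rw [pvIntercalate_cons₂]
    rw [List.append_assoc, pvSplitAux_append p [] _ hp]
    simp only [List.singleton_append, List.append_nil, pvSplitAux]
    rw [ih q (hq q (by simp)) (fun r hr => hq r (by simp [hr]))]
    simp

def pvGood (q : List Char) : Prop :=
  q ≠ [] ∧ '.' ∉ q ∧ PySem.Chars.strip q = q ∧ PySem.Chars.lower q = q

lemma pvLstrip_eq_self (l : List Char) (h : ∀ c, l.head? = some c → PySem.Chars.isspace c = false) :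
    PySem.Chars.lstrip l = l := by
  unfold PySem.Chars.lstrip
  rw [List.dropWhile_eq_self_iff]
  intro hl
  have := h l[0] (by simp [List.head?_eq_getElem?, List.getElem?_eq_getElem hl])
  simp [this]

lemma pvRstrip_eq_self (l : List Char) (h : ∀ c, l.getLast? = some c → PySem.Chars.isspace c = false) :
    PySem.Chars.rstrip l = l := by
  unfold PySem.Chars.rstrip
  have : List.dropWhile PySem.Chars.isspace l.reverse = l.reverse := by
    rw [List.dropWhile_eq_self_iff]
    intro hl
    have hh : l.getLast? = some l.reverse[0] := by
      rw [← List.head?_reverse]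
      simp [List.head?_eq_getElem?, List.getElem?_eq_getElem hl]
    simp only [List.getElem_reverse] at hh
    simp only [Nat.sub_zero] at hh
    simp [h _ hh]
  simp [this]

-- strip fixes a list iff nothing is dropped at either end
lemma pvStrip_eq_self (l : List Char)
    (h1 : ∀ c, l.head? = some c → PySem.Chars.isspace c = false)
    (h2 : ∀ c, l.getLast? = some c → PySem.Chars.isspace c = false) :
    PySem.Chars.strip l = l := by
  unfold PySem.Chars.strip
  rw [pvLstrip_eq_self l h1, pvRstrip_eq_self l h2]

lemma pvPrefix_head {l1 l2 : List Char} (h : l1 <+: l2) (hne : l1 ≠ []) : l2.head? = l1.head? := by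
  obtain ⟨r, rfl⟩ := h
  cases l1 with
  | nil => exact absurd rfl hne
  | cons a t => simp

-- head/last of strip are not spaces
lemma pvStrip_last (l : List Char) (c : Char) (h : (PySem.Chars.strip l).getLast? = some c) :
    PySem.Chars.isspace c = false := by
  unfold PySem.Chars.strip PySem.Chars.rstrip at h
  rw [← List.head?_reverse, List.reverse_reverse] at h
  have := List.head?_dropWhile_not PySem.Chars.isspace (PySem.Chars.lstrip l).reverse
  rw [h] at this
  exact this

lemma pvStrip_head (l : List Char) (c : Char) (h : (PySem.Chars.strip l).head? = some c) :
    PySem.Chars.isspace c = false := by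
  unfold PySem.Chars.strip PySem.Chars.rstrip at h
  have hne : ((List.dropWhile PySem.Chars.isspace (PySem.Chars.lstrip l).reverse).reverse) ≠ [] := by
    intro h0; rw [h0] at h; simp at h
  have hpre : ((List.dropWhile PySem.Chars.isspace (PySem.Chars.lstrip l).reverse).reverse) <+: (PySem.Chars.lstrip l) := by
    have hs : (List.dropWhile PySem.Chars.isspace (PySem.Chars.lstrip l).reverse) <:+ (PySem.Chars.lstrip l).reverse :=
      List.dropWhile_suffix _
    have := List.reverse_prefix.mpr hs
    simpa using this
  have hh := pvPrefix_head hpre hne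
  rw [h] at hh
  unfold PySem.Chars.lstrip at hh
  have := List.head?_dropWhile_not PySem.Chars.isspace l
  rw [hh] at this
  exact this

lemma pvIsupper_toNat {c : Char} (h : PySem.Chars.isupper c = true) :
    65 ≤ c.toNat ∧ c.toNat ≤ 90 := by
  simp [PySem.Chars.isupper, Char.le_def] at h
  exact ⟨h.1, h.2⟩

lemma pvLowerChar_toNat {c : Char} (h : PySem.Chars.isupper c = true) :
    (PySem.Chars.lowerChar c).toNat = c.toNat + 32 := by
  obtain ⟨h1, h2⟩ := pvIsupper_toNat h
  unfold PySem.Chars.lowerChar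
  rw [if_pos h, Char.toNat_ofNat, if_pos]
  unfold Nat.isValidChar
  left; omega

lemma pvIsupper_eq (c : Char) : PySem.Chars.isupper c = (decide (65 ≤ c.toNat) && decide (c.toNat ≤ 90)) := by
  unfold PySem.Chars.isupper
  congr 1

lemma pvIsspace_lowerChar (c : Char) :
    PySem.Chars.isspace (PySem.Chars.lowerChar c) = PySem.Chars.isspace c := by
  by_cases h : PySem.Chars.isupper c = true
  · obtain ⟨h1, h2⟩ := pvIsupper_toNat h
    have hl := pvLowerChar_toNat h
    have hlf : PySem.Chars.isspace (PySem.Chars.lowerChar c) = false := by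
      simp [PySem.Chars.isspace, hl]; omega
    have hcf : PySem.Chars.isspace c = false := by
      simp [PySem.Chars.isspace]; omega
    rw [hlf, hcf]
  · simp [PySem.Chars.lowerChar, h]

lemma pvLowerChar_idem (c : Char) :
    PySem.Chars.lowerChar (PySem.Chars.lowerChar c) = PySem.Chars.lowerChar c := by
  by_cases h : PySem.Chars.isupper c = true
  · have hl := pvLowerChar_toNat h
    obtain ⟨h1, h2⟩ := pvIsupper_toNat h
    have hu : PySem.Chars.isupper (PySem.Chars.lowerChar c) = false := by
      rw [pvIsupper_eq, hl]
      simp; omega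
    conv_lhs => rw [PySem.Chars.lowerChar, hu]
    simp
  · simp [PySem.Chars.lowerChar, h]

lemma pvLowerChar_dot (c : Char) : PySem.Chars.lowerChar c = '.' ↔ c = '.' := by
  constructor
  · intro h
    by_cases hu : PySem.Chars.isupper c = true
    · exfalso
      have hl := pvLowerChar_toNat hu
      obtain ⟨h1, h2⟩ := pvIsupper_toNat hu
      rw [h] at hl
      simp at hl; omega
    · simpa [PySem.Chars.lowerChar, hu] using h
  · intro h; subst h; decide

lemma pvMem_strip {x : Char} {l : List Char} (h : x ∈ PySem.Chars.strip l) : x ∈ l := by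
  unfold PySem.Chars.strip PySem.Chars.rstrip PySem.Chars.lstrip at h
  have h1 := (List.dropWhile_sublist (l := (List.dropWhile PySem.Chars.isspace l).reverse)
      (p := PySem.Chars.isspace)).mem (by simpa using h)
  exact (List.dropWhile_sublist (l := l) (p := PySem.Chars.isspace)).mem (by simpa using h1)

lemma pvSplitAux_no_dot : ∀ (l cur piece : List Char), '.' ∉ cur →
    piece ∈ pvSplitAux cur l → '.' ∉ piece := by
  intro l
  induction l with
  | nil =>
    intro cur piece hc hm
    simp [pvSplitAux] at hm
    subst hm; simpa using hc
  | cons c r ih =>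
    intro cur piece hc hm
    by_cases hd : c = '.'
    · subst hd
      simp [pvSplitAux] at hm
      rcases hm with hm | hm
      · subst hm; simpa using hc
      · exact ih [] piece (by simp) hm
    · simp [pvSplitAux, hd] at hm
      exact ih (c :: cur) piece (by simp [hc, Ne.symm hd]) hm

lemma pvGood_head {q : List Char} (hg : pvGood q) :
    ∀ c, q.head? = some c → PySem.Chars.isspace c = false := by
  intro c hc
  exact pvStrip_head q c (by rw [hg.2.2.1]; exact hc)

lemma pvGood_last {q : List Char} (hg : pvGood q) :
    ∀ c, q.getLast? = some c → PySem.Chars.isspace c = false := by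
  intro c hc
  exact pvStrip_last q c (by rw [hg.2.2.1]; exact hc)

lemma pvIntercalate_single (a : List Char) : List.intercalate ['.'] [a] = a := by
  simp [List.intercalate, List.intersperse]

lemma pvJoin_ne_nil (p : List Char) (ps : List (List Char)) (hp : p ≠ []) :
    List.intercalate ['.'] (p :: ps) ≠ [] := by
  cases ps with
  | nil => simpa [pvIntercalate_single] using hp
  | cons q t =>
    rw [pvIntercalate_cons₂]
    simp [hp]

lemma pvJoin_head (p : List Char) (ps : List (List Char)) (hp : p ≠ []) :
    (List.intercalate ['.'] (p :: ps)).head? = p.head? := by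
  cases ps with
  | nil => rw [pvIntercalate_single]
  | cons q t =>
    rw [pvIntercalate_cons₂]
    cases p with
    | nil => exact absurd rfl hp
    | cons a b => simp

lemma pvJoin_last : ∀ (ps : List (List Char)) (p : List Char), p ≠ [] → (∀ q ∈ ps, q ≠ []) →
    (List.intercalate ['.'] (p :: ps)).getLast? = ((p :: ps).getLast (by simp)).getLast? := by
  intro ps
  induction ps with
  | nil => intro p hp _; rw [pvIntercalate_single]; simp
  | cons q t ih =>
    intro p hp hq
    rw [pvIntercalate_cons₂, List.append_assoc, List.getLast?_append]
    have hne := pvJoin_ne_nil q t (hq q (by simp))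
    have h1 : (['.'] ++ List.intercalate ['.'] (q :: t)).getLast? =
        (List.intercalate ['.'] (q :: t)).getLast? := by
      rw [List.getLast?_append]
      cases h : (List.intercalate ['.'] (q :: t)).getLast? with
      | none => exact absurd (List.getLast?_eq_none_iff.mp h) hne
      | some x => simp
    rw [h1, ih q (hq q (by simp)) (fun r hr => hq r (by simp [hr]))]
    have hgl : ((q :: t).getLast (by simp)) ≠ [] := hq _ (List.getLast_mem (by simp))
    have h2 : ((p :: q :: t).getLast (by simp) : List Char) = (q :: t).getLast (by simp) :=
      List.getLast_cons (by simp)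
    rw [h2]
    cases hx : ((q :: t).getLast (by simp)).getLast? with
    | none => exact absurd (List.getLast?_eq_none_iff.mp hx) hgl
    | some x => simp

-- every segment a normalization produces is pvGood
lemma pvNormA_good (cs : List Char) : ∀ q ∈ pvNormalizeA cs, pvGood q := by
  intro q hq
  unfold pvNormalizeA at hq
  by_cases h0 : cs = []
  · simp [h0] at hq
  · rw [if_neg h0] at hq
    simp only [List.mem_map, List.mem_filter] at hq
    obtain ⟨p, ⟨hp, hps⟩, rfl⟩ := hq
    have hpne : PySem.Chars.strip p ≠ [] := by simpa using hps
    have hdot : '.' ∉ p := by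
      rw [pvSplitOn_eq] at hp
      exact pvSplitAux_no_dot _ [] p (by simp) hp
    refine ⟨?_, ?_, ?_, ?_⟩
    · unfold PySem.Chars.lower
      simpa using hpne
    · intro hmem
      unfold PySem.Chars.lower at hmem
      obtain ⟨d, hd, hd2⟩ := List.mem_map.mp hmem
      exact hdot (pvMem_strip ((pvLowerChar_dot d).mp hd2 ▸ hd))
    · apply pvStrip_eq_self
      · intro c hc
        unfold PySem.Chars.lower at hc
        rw [List.head?_map] at hc
        cases hh : (PySem.Chars.strip p).head? with
        | none => rw [hh] at hc; simp at hc
        | some d =>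
          rw [hh] at hc; simp at hc
          rw [← hc, pvIsspace_lowerChar]
          exact pvStrip_head p d hh
      · intro c hc
        unfold PySem.Chars.lower at hc
        rw [List.getLast?_map] at hc
        cases hh : (PySem.Chars.strip p).getLast? with
        | none => rw [hh] at hc; simp at hc
        | some d =>
          rw [hh] at hc; simp at hc
          rw [← hc, pvIsspace_lowerChar]
          exact pvStrip_last p d hh
    · unfold PySem.Chars.lower
      rw [List.map_map]
      exact List.map_congr_left (fun d _ => pvLowerChar_idem d)

-- re-normalizing the dot-join of good segments gives them back
lemma pvNormA_join (parts : List (List Char)) (h : ∀ q ∈ parts, pvGood q) :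
    pvNormalizeA (PySem.Chars.join ['.'] parts) = parts := by
  cases parts with
  | nil => simp [PySem.Chars.join, List.intercalate, pvNormalizeA]
  | cons p ps =>
    have hje : PySem.Chars.join ['.'] (p :: ps) = List.intercalate ['.'] (p :: ps) := rfl
    have hpg := h p (by simp)
    have hne := pvJoin_ne_nil p ps hpg.1
    have hstrip : PySem.Chars.strip (List.intercalate ['.'] (p :: ps)) =
        List.intercalate ['.'] (p :: ps) := by
      apply pvStrip_eq_self
      · intro c hc
        rw [pvJoin_head p ps hpg.1] at hc
        exact pvGood_head hpg c hc
      · intro c hc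
        rw [pvJoin_last ps p hpg.1 (fun q hq => (h q (by simp [hq])).1)] at hc
        exact pvGood_last (h _ (List.getLast_mem (by simp))) c hc
    unfold pvNormalizeA
    rw [hje, if_neg hne, hstrip, pvSplitOn_eq,
      pvSplit_roundtrip ps p (hpg.2.1) (fun q hq => (h q (by simp [hq])).2.1)]
    have hf : (p :: ps).filter (fun q => decide (PySem.Chars.strip q ≠ [])) = p :: ps := by
      apply List.filter_eq_self.mpr
      intro q hq
      rw [(h q hq).2.2.1]
      simpa using (h q hq).1
    rw [hf]
    conv_rhs => rw [← List.map_id (p :: ps)]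
    apply List.map_congr_left
    intro q hq
    rw [(h q hq).2.2.1, (h q hq).2.2.2]
    rfl

-- a wildcard-free pattern matches exactly itself
lemma pvMatch_plain : ∀ (pat l : List (List Char)),
    (∀ p ∈ pat, p ≠ ['*','*'] ∧ p ≠ ['*']) →
    pvMatchParts pat l = decide (l = pat) := by
  intro pat
  induction pat with
  | nil =>
    intro l _
    cases l <;> simp [pvMatchParts]
  | cons p rest ih =>
    intro l hw
    have hp := hw p (by simp)
    cases l with
    | nil => simp [pvMatchParts, hp.1]
    | cons t ts =>
      simp only [pvMatchParts, if_neg hp.1]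
      by_cases he : p = t
      · subst he
        rw [if_neg (by simp), ih ts (fun q hq => hw q (by simp [hq]))]
        simp
      · rw [if_pos ⟨hp.2, he⟩]
        have hne : t :: ts ≠ p :: rest := by
          intro h0
          injection h0 with h1 _
          exact he h1.symm
        simp [hne]

lemma pvAny_drop_singleton : ∀ (l : List (List Char)) (w : List Char),
    ((List.range (l.length + 1)).any (fun i => decide (l.drop i = [w]))) =
      decide (l.getLast? = some w) := by
  intro l
  induction l with
  | nil => intro w; simp
  | cons a t ih =>
    intro w
    rw [List.range_succ_eq_map]
    simp only [List.any_cons, List.any_map]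
    simp only [List.length_cons]
    have h1 : ((List.range (t.length + 1)).any ((fun i => decide ((a :: t).drop i = [w])) ∘ Nat.succ)) =
        ((List.range (t.length + 1)).any (fun i => decide (t.drop i = [w]))) := by
      apply PySem.List.any_congr_mem
      intro i _
      simp
    rw [h1, ih w]
    cases t with
    | nil => simp
    | cons b u =>
      have hne : a :: b :: u ≠ [w] := by simp
      simp [hne]

-- '**.w' (w wildcard-free) matches exactly the paths whose last segment is w
lemma pvMatch_star2 (w : List Char) (hw : w ≠ ['*','*'] ∧ w ≠ ['*']) (l : List (List Char)) :
    pvMatchParts [['*','*'], w] l = decide (l.getLast? = some w) := by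
  rw [show pvMatchParts [['*','*'], w] l =
      (List.range (l.length + 1)).any (fun i => pvMatchParts [w] (l.drop i)) by
    simp [pvMatchParts]]
  rw [← pvAny_drop_singleton l w]
  apply PySem.List.any_congr_mem
  intro i _
  rw [pvMatch_plain [w] (l.drop i) (fun p hp => by simpa [List.eq_of_mem_singleton hp] using hw)]

-- one plain-segment step of the matcher
lemma pvMatch_step_nil (p : List Char) (rest : List (List Char)) (hp : p ≠ ['*','*']) :
    pvMatchParts (p :: rest) [] = false := by
  simp [pvMatchParts, hp]

lemma pvMatch_step_cons (p : List Char) (rest : List (List Char)) (t : List Char)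
    (ts : List (List Char)) (hp : p ≠ ['*','*']) :
    pvMatchParts (p :: rest) (t :: ts) =
      if p ≠ ['*'] ∧ p ≠ t then false else pvMatchParts rest ts := by
  simp [pvMatchParts, hp]

-- 'a.b.c.*' (a b c wildcard-free) matches exactly the 4-segment paths starting a, b, c
lemma pvMatch_trusted (a b c : List Char)
    (ha : a ≠ ['*','*'] ∧ a ≠ ['*']) (hb : b ≠ ['*','*'] ∧ b ≠ ['*']) (hc : c ≠ ['*','*'] ∧ c ≠ ['*'])
    (l : List (List Char)) :
    pvMatchParts [a, b, c, ['*']] l =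
      (decide (l.length = 4) && decide (l.take 3 = [a, b, c])) := by
  rcases l with _ | ⟨x, _ | ⟨y, _ | ⟨z, _ | ⟨u, v⟩⟩⟩⟩
  · rw [pvMatch_step_nil _ _ ha.1]; simp
  · rw [pvMatch_step_cons _ _ _ _ ha.1]
    by_cases hax : a = x
    · rw [if_neg (by simp [hax]), pvMatch_step_nil _ _ hb.1]; simp
    · rw [if_pos ⟨ha.2, hax⟩]; simp
  · rw [pvMatch_step_cons _ _ _ _ ha.1]
    by_cases hax : a = x
    · rw [if_neg (by simp [hax]), pvMatch_step_cons _ _ _ _ hb.1]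
      by_cases hby : b = y
      · rw [if_neg (by simp [hby]), pvMatch_step_nil _ _ hc.1]; simp
      · rw [if_pos ⟨hb.2, hby⟩]; simp
    · rw [if_pos ⟨ha.2, hax⟩]; simp
  · rw [pvMatch_step_cons _ _ _ _ ha.1]
    by_cases hax : a = x
    · rw [if_neg (by simp [hax]), pvMatch_step_cons _ _ _ _ hb.1]
      by_cases hby : b = y
      · rw [if_neg (by simp [hby]), pvMatch_step_cons _ _ _ _ hc.1]
        by_cases hcz : c = z
        · rw [if_neg (by simp [hcz]), pvMatch_step_nil _ _ (by simp)]; simp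
        · rw [if_pos ⟨hc.2, hcz⟩]; simp [Ne.symm hcz]
      · rw [if_pos ⟨hb.2, hby⟩]; simp [Ne.symm hby]
    · rw [if_pos ⟨ha.2, hax⟩]; simp [Ne.symm hax]
  · rw [pvMatch_step_cons _ _ _ _ ha.1]
    by_cases hax : a = x
    · rw [if_neg (by simp [hax]), pvMatch_step_cons _ _ _ _ hb.1]
      by_cases hby : b = y
      · rw [if_neg (by simp [hby]), pvMatch_step_cons _ _ _ _ hc.1]
        by_cases hcz : c = z
        · rw [if_neg (by simp [hcz]), pvMatch_step_cons _ _ _ _ (by simp)]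
          rw [if_neg (by simp)]
          subst hax; subst hby; subst hcz
          cases v <;> simp [pvMatchParts]
        · rw [if_pos ⟨hc.2, hcz⟩]; simp [Ne.symm hcz]
      · rw [if_pos ⟨hb.2, hby⟩]; simp [Ne.symm hby]
    · rw [if_pos ⟨ha.2, hax⟩]; simp [Ne.symm hax]

-- ===== VERDICT (by name: the statement is the Claim_ definition above) =====
lemma pvNormB_eq : pvNormalizeB = pvNormalizeA := rfl

theorem is_sensitive_config_path_spec : Claim_equal_is_sensitive_config_path := by
  intro path _
  unfold Spec_is_sensitive_config_path
  unfold is_sensitive_config_path is_sensitive_config_path_alt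
  rw [pvNormB_eq]
  cases hl : pvNormalizeA path.toList with
  | nil => simp [PySem.Chars.join, List.intercalate]
  | cons p ps =>
    have hgood : ∀ q ∈ p :: ps, pvGood q := by
      rw [← hl]; exact pvNormA_good path.toList
    have hje : PySem.Chars.join ['.'] (p :: ps) = List.intercalate ['.'] (p :: ps) := rfl
    have hne := pvJoin_ne_nil p ps (hgood p (by simp)).1
    rw [hje, if_neg hne]
    have hkey : ∀ pat : List Char, pvMatchPattern pat (List.intercalate ['.'] (p :: ps)) =
        (if pvNormalizeA pat = [] then false else pvMatchParts (pvNormalizeA pat) (p :: ps)) := by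
      intro pat
      unfold pvMatchPattern
      rw [show pvNormalizeA (List.intercalate ['.'] (p :: ps)) = p :: ps from
        pvNormA_join (p :: ps) hgood]
    simp only [pvSensitivePatterns, List.any_cons, List.any_nil, hkey]
    have e1 : pvNormalizeA "telegram.token".toList = ["telegram".toList, "token".toList] := by decide
    have e2 : pvNormalizeA "discord.token".toList = ["discord".toList, "token".toList] := by decide
    have e3 : pvNormalizeA "hooks.token".toList = ["hooks".toList, "token".toList] := by decide
    have e4 : pvNormalizeA "email.password".toList = ["email".toList, "password".toList] := by decide
    have e5 : pvNormalizeA "feishu.app_secret".toList = ["feishu".toList, "app_secret".toList] := by decide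
    have e6 : pvNormalizeA "**.api_key".toList = [['*','*'], "api_key".toList] := by decide
    have e7 : pvNormalizeA "**.token".toList = [['*','*'], "token".toList] := by decide
    have e8 : pvNormalizeA "**.secret".toList = [['*','*'], "secret".toList] := by decide
    have e9 : pvNormalizeA "**.password".toList = [['*','*'], "password".toList] := by decide
    have e10 : pvNormalizeA "**.credentials".toList = [['*','*'], "credentials".toList] := by decide
    have e11 : pvNormalizeA "web.search.brave_api_key".toList =
        ["web".toList, "search".toList, "brave_api_key".toList] := by decide
    have e12 : pvNormalizeA "plugins.signature.trusted_keys.*".toList =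
        ["plugins".toList, "signature".toList, "trusted_keys".toList, ['*']] := by decide
    rw [e1, e2, e3, e4, e5, e6, e7, e8, e9, e10, e11, e12]
    rw [pvMatch_plain _ _ (by decide), pvMatch_plain _ _ (by decide),
      pvMatch_plain _ _ (by decide), pvMatch_plain _ _ (by decide),
      pvMatch_plain _ _ (by decide),
      pvMatch_star2 _ (by decide), pvMatch_star2 _ (by decide), pvMatch_star2 _ (by decide),
      pvMatch_star2 _ (by decide), pvMatch_star2 _ (by decide),
      pvMatch_plain _ _ (by decide),
      pvMatch_trusted _ _ _ (by decide) (by decide) (by decide)]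
    rw [List.getLast?_eq_some_getLast (l := p :: ps) (by simp)]
    rw [Bool.eq_iff_iff]
    simp [pvSuffixes, pvExact]
    constructor
    · rintro (h|h|h|h|h|h|h|h|h|h|h|h)
      exacts [Or.inl (Or.inr (Or.inl h)), Or.inl (Or.inr (Or.inr (Or.inl h))),
        Or.inl (Or.inr (Or.inr (Or.inr (Or.inl h)))),
        Or.inl (Or.inr (Or.inr (Or.inr (Or.inr (Or.inl h))))),
        Or.inl (Or.inr (Or.inr (Or.inr (Or.inr (Or.inr (Or.inl h)))))),
        Or.inl (Or.inl (Or.inl h)), Or.inl (Or.inl (Or.inr (Or.inl h))),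
        Or.inl (Or.inl (Or.inr (Or.inr (Or.inl h)))),
        Or.inl (Or.inl (Or.inr (Or.inr (Or.inr (Or.inl h))))),
        Or.inl (Or.inl (Or.inr (Or.inr (Or.inr (Or.inr h))))),
        Or.inl (Or.inr (Or.inr (Or.inr (Or.inr (Or.inr (Or.inr h)))))), Or.inr h]
    · rintro (((h|h|h|h|h)|(h|h|h|h|h|h))|h)
      exacts [Or.inr (Or.inr (Or.inr (Or.inr (Or.inr (Or.inl h))))),
        Or.inr (Or.inr (Or.inr (Or.inr (Or.inr (Or.inr (Or.inl h)))))),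
        Or.inr (Or.inr (Or.inr (Or.inr (Or.inr (Or.inr (Or.inr (Or.inl h))))))),
        Or.inr (Or.inr (Or.inr (Or.inr (Or.inr (Or.inr (Or.inr (Or.inr (Or.inl h)))))))),
        Or.inr (Or.inr (Or.inr (Or.inr (Or.inr (Or.inr (Or.inr (Or.inr (Or.inr (Or.inl h))))))))),
        Or.inl h, Or.inr (Or.inl h), Or.inr (Or.inr (Or.inl h)),
        Or.inr (Or.inr (Or.inr (Or.inl h))),
        Or.inr (Or.inr (Or.inr (Or.inr (Or.inl h)))),
        Or.inr (Or.inr (Or.inr (Or.inr (Or.inr (Or.inr (Or.inr (Or.inr (Or.inr (Or.inr (Or.inl h)))))))))),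
        Or.inr (Or.inr (Or.inr (Or.inr (Or.inr (Or.inr (Or.inr (Or.inr (Or.inr (Or.inr (Or.inr h))))))))))]
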